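-- pv_equiv track=rewrite | github.com/coltynw/cs-sprint-challenge-hash-tables | hashtables/ex5/ex5.py | finder
-- ===== SOURCE A (Python) =====
-- def finder(files, queries):
--     """
--     YOUR CODE HERE
--     """
--     # Your code here
--
--     # this one was as easy as just double for looping through and appending the matches, but since the test was super long I had to redo it with a dictionary and splitting up the array
--
--     # result = []
--
--     # for q in queries:
--     #     for f in files:
--     #         if q in f:
--     #             result.append(f)
--
--
--
--
--
--
--     # long test solution
--
--     result = []
--     box = {} # box is dictionary
--
--     for f in files:
--         split = f.split("/") # split the array up at the /
--         name = split[-1] # take the last part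
--
--         if name not in box: # make new spot in dictionary
--             box[name] = []
--
--         box[name].append(f) # add to dictionary with filename as [key]
--
--     for q in queries:
--         if q in box: # if queries is in the dictionary add it to result
--             result.extend(box[q]) # add to end
--
--
--
--
--     return result
-- ===== SOURCE B (Python) =====
-- def finder(files, queries):
--     # Simpler: no dictionary index; compute each file's basename once, then a
--     # direct queries-outer/files-inner double loop with exact basename equality.
--     names = [f.split("/")[-1] for f in files]
--     result = []
--     for q in queries:
--         for f, name in zip(files, names):
--             if name == q:
--                 result.append(f)
--     return result
-- ===== Notes on version B (the rewrite author's own statement) =====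
-- stated objective: simpler
-- what changed: Replaced A's grouping-dictionary index (build box[basename] lists, then look up each query) with a direct queries-outer/files-inner double loop appending files whose basename equals the query.
import Mathlib
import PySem

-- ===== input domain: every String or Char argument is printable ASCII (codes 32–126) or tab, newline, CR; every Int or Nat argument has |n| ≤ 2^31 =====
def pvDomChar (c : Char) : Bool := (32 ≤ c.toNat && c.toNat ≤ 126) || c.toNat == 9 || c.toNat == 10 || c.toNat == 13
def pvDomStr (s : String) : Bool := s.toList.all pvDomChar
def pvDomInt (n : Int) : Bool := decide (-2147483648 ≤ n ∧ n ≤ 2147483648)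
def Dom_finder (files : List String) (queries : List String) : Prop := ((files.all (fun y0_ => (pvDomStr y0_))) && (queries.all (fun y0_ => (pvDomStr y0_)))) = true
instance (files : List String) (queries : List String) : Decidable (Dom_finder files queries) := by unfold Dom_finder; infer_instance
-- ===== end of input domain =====

-- B replaces A's grouping-dictionary index by a direct queries-outer/files-inner
-- double loop with exact basename equality; simpler, same return value.

-- shared helper: f.split("/")[-1]  (split with the nonempty separator "/" never
-- returns none or an empty list, so the .getD fallbacks are unreachable)
def pvBasename (f : String) : String :=
  (PySem.List.pyGet? ((PySem.Str.split? f "/").getD []) (-1)).getD ""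

-- ===== PORT A =====
def finder (files : List String) (queries : List String) : List String :=
  let box := files.foldl
    (fun (box : PySem.Dict String (List String)) f =>
      let name := pvBasename f
      let box := if box.contains name then box else box.insert name []
      box.insert name (box.getD name [] ++ [f]))
    PySem.Dict.empty
  queries.foldl
    (fun result q => if box.contains q then result ++ box.getD q [] else result) []

-- ===== PORT B =====
def finder_alt (files : List String) (queries : List String) : List String :=
  let names := files.map pvBasename
  queries.foldl
    (fun result q =>
      (files.zip names).foldl
        (fun result p => if p.2 == q then result ++ [p.1] else result)
        result)
    []

-- ===== PRECONDITION & SPEC =====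
def Spec_finder (files : List String) (queries : List String) (out : List String) : Prop := out = finder_alt files queries
instance (files : List String) (queries : List String) (out : List String) : Decidable (Spec_finder files queries out) := by unfold Spec_finder; infer_instance

-- ===== CLAIM (what is proved, stated in full; the proofs are below) =====
def Claim_equal_finder : Prop := ∀ (files : List String) (queries : List String), Dom_finder files queries → Spec_finder files queries (finder files queries)

-- ===== LEMMAS AND PROOFS =====

-- A's build loop, as a named function for the lemmas (definitionally the foldl in `finder`)
def pvBuild (fs : List String) (d : PySem.Dict String (List String)) :
    PySem.Dict String (List String) :=
  fs.foldl
    (fun (box : PySem.Dict String (List String)) f =>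
      let name := pvBasename f
      let box := if box.contains name then box else box.insert name []
      box.insert name (box.getD name [] ++ [f]))
    d

lemma pvBuild_contains (fs : List String) (d : PySem.Dict String (List String))
    (q : String) :
    (pvBuild fs d).contains q = (d.contains q || fs.any (fun f => pvBasename f == q)) := by
  induction fs generalizing d with
  | nil => simp [pvBuild]
  | cons f fs ih =>
      simp only [pvBuild, List.foldl_cons, List.any_cons] at *
      rw [ih]
      have hstep : ∀ (d1 : PySem.Dict String (List String)),
          ((if d1.contains (pvBasename f) then d1 else d1.insert (pvBasename f) []).insert
            (pvBasename f)
            ((if d1.contains (pvBasename f) then d1 else d1.insert (pvBasename f) []).getD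
              (pvBasename f) [] ++ [f])).contains q
          = (q == pvBasename f || d1.contains q) := by
        intro d1
        by_cases h : d1.contains (pvBasename f) <;>
          simp [h, PySem.Dict.contains_insert]
      rw [hstep]
      by_cases hq : pvBasename f = q
      · simp [hq, Bool.or_comm]
      · have h1 : (q == pvBasename f) = false := by simp [Ne.symm hq]
        have h2 : (pvBasename f == q) = false := by simp [hq]
        simp [h1, h2]

lemma pvBuild_getD (fs : List String) (d : PySem.Dict String (List String))
    (q : String) :
    (pvBuild fs d).getD q [] = d.getD q [] ++ fs.filter (fun f => pvBasename f == q) := by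
  induction fs generalizing d with
  | nil => simp [pvBuild]
  | cons f fs ih =>
      simp only [pvBuild, List.foldl_cons, List.filter_cons] at *
      rw [ih]
      have hstep : ∀ (d1 : PySem.Dict String (List String)),
          ((if d1.contains (pvBasename f) then d1 else d1.insert (pvBasename f) []).insert
            (pvBasename f)
            ((if d1.contains (pvBasename f) then d1 else d1.insert (pvBasename f) []).getD
              (pvBasename f) [] ++ [f])).getD q []
          = if pvBasename f == q then d1.getD q [] ++ [f] else d1.getD q [] := by
        intro d1
        by_cases hq : pvBasename f = q
        · subst hq
          by_cases h : d1.contains (pvBasename f) <;>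
            simp [h, PySem.Dict.getD_of_not_contains]
        · have hq' : q ≠ pvBasename f := fun hh => hq hh.symm
          by_cases h : d1.contains (pvBasename f) <;>
            simp [h, hq, hq', PySem.Dict.getD_insert, beq_iff_eq]
      rw [hstep]
      by_cases hq : pvBasename f == q <;> simp [hq]

-- both programs, per query, append exactly the files with that basename
lemma finder_eq_filterFold (files queries : List String) :
    finder files queries
      = queries.foldl (fun r q => r ++ files.filter (fun f => pvBasename f == q)) [] := by
  have key : ∀ (r : List String) (q : String),
      (if (pvBuild files PySem.Dict.empty).contains q then
        r ++ (pvBuild files PySem.Dict.empty).getD q [] else r)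
      = r ++ files.filter (fun f => pvBasename f == q) := by
    intro r q
    have hc : (pvBuild files PySem.Dict.empty).contains q
        = files.any (fun f => pvBasename f == q) := by
      simp [pvBuild_contains]
    have hg := pvBuild_getD files PySem.Dict.empty q
    simp only [PySem.Dict.getD_empty, List.nil_append] at hg
    by_cases h : files.any (fun f => pvBasename f == q)
    · simp [hc, h, hg]
    · have hfil : files.filter (fun f => pvBasename f == q) = [] := by
        simp only [List.any_eq_true] at h
        simp only [List.filter_eq_nil_iff]
        intro a ha hb
        exact h ⟨a, ha, hb⟩
      simp [hc, h, hfil]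
  show queries.foldl
      (fun result q => if (pvBuild files PySem.Dict.empty).contains q then
          result ++ (pvBuild files PySem.Dict.empty).getD q [] else result) []
    = _
  rw [show (fun (result : List String) (q : String) =>
        if (pvBuild files PySem.Dict.empty).contains q then
          result ++ (pvBuild files PySem.Dict.empty).getD q [] else result)
      = (fun r q => r ++ files.filter (fun f => pvBasename f == q))
    from funext fun r => funext fun q => key r q]

lemma zip_names_filter_map (files : List String) (q : String) :
    ((files.zip (files.map pvBasename)).filter (fun p => p.2 == q)).map (fun p => p.1)
      = files.filter (fun f => pvBasename f == q) := by
  induction files with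
  | nil => simp
  | cons f fs ih =>
      simp only [List.map_cons, List.zip_cons_cons, List.filter_cons]
      by_cases h : pvBasename f == q <;> simp [h, ih]

lemma finder_alt_eq_filterFold (files queries : List String) :
    finder_alt files queries
      = queries.foldl (fun r q => r ++ files.filter (fun f => pvBasename f == q)) [] := by
  show queries.foldl
      (fun result q =>
        (files.zip (files.map pvBasename)).foldl
          (fun result p => if p.2 == q then result ++ [p.1] else result) result) []
    = _
  rw [show (fun (result : List String) (q : String) =>
        (files.zip (files.map pvBasename)).foldl
          (fun result p => if p.2 == q then result ++ [p.1] else result) result)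
      = (fun r q => r ++ files.filter (fun f => pvBasename f == q))
    from funext fun r => funext fun q => by
      rw [PySem.List.foldl_append_if (fun p => p.2 == q) (fun p => p.1)
            (files.zip (files.map pvBasename)) r,
          zip_names_filter_map]]

-- ===== VERDICT (by name: the statement is the Claim_ definition above) =====
theorem finder_spec : Claim_equal_finder := by
  intro files queries _
  unfold Spec_finder
  rw [finder_eq_filterFold, finder_alt_eq_filterFold]
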